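-- pv_equiv track=rewrite | github.com/tommoseley/TheCombine | app/api/v1/services/intake_pure.py | deduplicate_pending_prompt
-- ===== SOURCE A (Python) =====
-- from typing import Any, Dict, List, Optional
--
-- def deduplicate_pending_prompt(
--     pending_prompt: Optional[str],
--     messages: List[Dict[str, str]],
-- ) -> Optional[str]:
--     """Remove pending_prompt if it duplicates the last assistant message.
--
--     Prevents duplication in the UI when the pending prompt is already
--     shown as the last assistant message in the conversation.
--     """
--     if not pending_prompt or not messages:
--         return pending_prompt
--
--     # Find the last assistant message
--     for m in reversed(messages):
--         if m["role"] == "assistant":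
--             if m["content"] == pending_prompt:
--                 return None
--             break
--
--     return pending_prompt
-- ===== SOURCE B (Python) =====
-- from typing import Any, Dict, List, Optional
--
-- def deduplicate_pending_prompt(
--     pending_prompt: Optional[str],
--     messages: List[Dict[str, str]],
-- ) -> Optional[str]:
--     """Remove pending_prompt if it duplicates the last assistant message."""
--     if not pending_prompt or not messages:
--         return pending_prompt
--     # Staged passes: collect ALL assistant contents, then look at the last one.
--     contents = [m.get("content") for m in messages if m.get("role") == "assistant"]
--     if contents and contents[-1] == pending_prompt:
--         return None
--     return pending_prompt
-- ===== Notes on version B (the rewrite author's own statement) =====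
-- stated objective: alternative
-- what changed: Replaces A's reverse scan with early break by staged passes: a comprehension first collects the contents of ALL assistant messages into a list, then the last element of that list is compared with the pending prompt once; B uses .get so it never raises KeyError (those A-raising inputs are excluded by Pre_).
import Mathlib
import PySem

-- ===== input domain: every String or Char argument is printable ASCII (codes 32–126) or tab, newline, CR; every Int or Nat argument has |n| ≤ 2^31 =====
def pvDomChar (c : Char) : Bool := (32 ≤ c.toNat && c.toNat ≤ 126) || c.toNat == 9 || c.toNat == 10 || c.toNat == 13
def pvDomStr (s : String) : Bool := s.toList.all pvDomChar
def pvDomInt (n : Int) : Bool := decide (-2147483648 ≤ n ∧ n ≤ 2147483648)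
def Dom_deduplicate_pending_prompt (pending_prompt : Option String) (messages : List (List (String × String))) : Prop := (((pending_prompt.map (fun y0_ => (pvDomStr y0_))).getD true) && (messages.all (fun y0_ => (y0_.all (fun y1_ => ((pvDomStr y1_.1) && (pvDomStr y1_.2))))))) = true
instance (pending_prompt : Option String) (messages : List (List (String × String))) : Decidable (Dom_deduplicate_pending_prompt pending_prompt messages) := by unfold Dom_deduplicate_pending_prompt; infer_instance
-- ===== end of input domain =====

-- B replaces A's reverse scan with early break by staged passes: a comprehension collecting
-- all assistant contents, then one comparison with the last collected element (objective: alternative decomposition).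

-- ===== PORT A =====
-- Python A scans reversed(messages) and breaks at the first message with role "assistant".
-- m["role"] / m["content"] are first-match assoc-list lookups; where Python would raise
-- KeyError the port reads '.getD ""' — those inputs are excluded by Pre_ below.
def pvALoop (pending : String) : List (List (String × String)) → Option String
  | [] => some pending
  | m :: rest =>
    if (List.lookup "role" m).getD "" = "assistant" then
      if (List.lookup "content" m).getD "" = pending then none else some pending
    else pvALoop pending rest

def deduplicate_pending_prompt (pending_prompt : Option String) (messages : List (List (String × String))) : Option String :=
  match pending_prompt with
  | none => none
  | some s =>
    if s = "" then some s
    else if messages = [] then some s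
    else pvALoop s messages.reverse

-- ===== PORT B =====
-- comprehension '[m.get("content") for m in messages if m.get("role") == "assistant"]',
-- then 'contents and contents[-1] == pending_prompt'; contents[-1] is getLast?
def deduplicate_pending_prompt_alt (pending_prompt : Option String) (messages : List (List (String × String))) : Option String :=
  match pending_prompt with
  | none => none
  | some s =>
    if s = "" then some s
    else if messages = [] then some s
    else
      let contents :=
        (messages.filter (fun m => decide (List.lookup "role" m = some "assistant"))).map
          (fun m => List.lookup "content" m)
      match contents.getLast? with
      | some c => if c = some s then none else some s
      | none => some s

-- ===== PRECONDITION & SPEC =====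
-- pvSafe: in A's reverse scan, every message inspected before the first assistant one has a
-- "role" key, and the first assistant message (if any) has a "content" key — exactly where
-- Python A does not raise KeyError.
def pvSafe (messages : List (List (String × String))) : Prop :=
  (∀ m ∈ messages.reverse.takeWhile (fun m => !(decide (List.lookup "role" m = some "assistant"))),
      (List.lookup "role" m).isSome = true) ∧
  (∀ m ∈ (messages.reverse.find? (fun m => decide (List.lookup "role" m = some "assistant"))).toList,
      (List.lookup "content" m).isSome = true)

-- Pre_ excludes exactly the inputs on which Python A raises KeyError (a scanned message
-- without "role", or a last assistant message without "content").
def Pre_deduplicate_pending_prompt (pending_prompt : Option String) (messages : List (List (String × String))) : Prop :=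
  ∀ s ∈ pending_prompt.toList, (s = "" ∨ messages = [] ∨ pvSafe messages)

instance (pending_prompt : Option String) (messages : List (List (String × String))) : Decidable (Pre_deduplicate_pending_prompt pending_prompt messages) := by
  unfold Pre_deduplicate_pending_prompt pvSafe; infer_instance

def pvWitness_deduplicate_pending_prompt : Option String × (List (List (String × String))) :=
  (some "hi", [[("role", "assistant"), ("content", "hi")]])

def Spec_deduplicate_pending_prompt (pending_prompt : Option String) (messages : List (List (String × String))) (out : Option String) : Prop := out = deduplicate_pending_prompt_alt pending_prompt messages
instance (pending_prompt : Option String) (messages : List (List (String × String))) (out : Option String) : Decidable (Spec_deduplicate_pending_prompt pending_prompt messages out) := by unfold Spec_deduplicate_pending_prompt; infer_instance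

-- ===== CLAIM (what is proved, stated in full; the proofs are below) =====
def Claim_equal_deduplicate_pending_prompt : Prop := ∀ (pending_prompt : Option String) (messages : List (List (String × String))), Dom_deduplicate_pending_prompt pending_prompt messages → Pre_deduplicate_pending_prompt pending_prompt messages → Spec_deduplicate_pending_prompt pending_prompt messages (deduplicate_pending_prompt pending_prompt messages)

-- ===== LEMMAS AND PROOFS =====

-- the last element of the filtered/mapped list is the lookup of the first assistant message in reverse order
theorem pvGetLast_filter_map (l : List (List (String × String))) :
    ((l.filter (fun m => decide (List.lookup "role" m = some "assistant"))).map
        (fun m => List.lookup "content" m)).getLast? =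
      (l.reverse.find? (fun m => decide (List.lookup "role" m = some "assistant"))).map
        (fun m => List.lookup "content" m) := by
  induction l using List.reverseRecOn with
  | nil => simp
  | append_singleton l m ih =>
    rw [List.filter_append, List.map_append, List.getLast?_append, List.reverse_append]
    simp only [List.reverse_singleton, List.singleton_append, List.find?_cons]
    by_cases h : List.lookup "role" m = some "assistant"
    · simp [h]
    · simp [h, ih]

-- A's reverse scan characterised by find? on the reversed list
theorem pvALoop_eq_find (pending : String) (rs : List (List (String × String))) :
    pvALoop pending rs =
      match rs.find? (fun m => decide (List.lookup "role" m = some "assistant")) with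
      | some m => if (List.lookup "content" m).getD "" = pending then none else some pending
      | none => some pending := by
  induction rs with
  | nil => simp [pvALoop]
  | cons m rest ih =>
    rw [List.find?_cons]
    by_cases h : List.lookup "role" m = some "assistant"
    · have hgd : (List.lookup "role" m).getD "" = "assistant" := by rw [h]; rfl
      simp [pvALoop, h]
    · have hgd : (List.lookup "role" m).getD "" ≠ "assistant" := by
        cases hr : List.lookup "role" m with
        | none => simp
        | some r => simp only [Option.getD_some]; intro he; exact h (by rw [hr, he])
      simp [pvALoop, hgd, h, ih]

-- the two branch tests agree for a nonempty pending prompt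
theorem pvContent_test (m : List (String × String)) (s : String) (hs : s ≠ "") :
    ((List.lookup "content" m).getD "" = s) = (List.lookup "content" m = some s) := by
  cases h : List.lookup "content" m with
  | none => simp [Ne.symm hs]
  | some c => simp

-- ===== VERDICT (by name: the statement is the Claim_ definition above) =====
theorem deduplicate_pending_prompt_spec : Claim_equal_deduplicate_pending_prompt := by
  intro pending_prompt messages _dom _pre
  unfold Spec_deduplicate_pending_prompt
  cases pending_prompt with
  | none => rfl
  | some s =>
    by_cases hs : s = ""
    · simp [deduplicate_pending_prompt, deduplicate_pending_prompt_alt, hs]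
    · by_cases hm : messages = []
      · simp [deduplicate_pending_prompt, deduplicate_pending_prompt_alt, hs, hm]
      · simp only [deduplicate_pending_prompt, deduplicate_pending_prompt_alt, hs, hm, if_false]
        rw [pvALoop_eq_find, pvGetLast_filter_map]
        cases hf : messages.reverse.find? (fun m => decide (List.lookup "role" m = some "assistant")) with
        | none => rfl
        | some m => simp [pvContent_test m s hs]
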